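-- pv_equiv track=rewrite | github.com/emohebi/compliance-agent-system | compliance-agent-system/tools/compliance_tools.py | _find_most_missing_keyword
-- ===== SOURCE A (Python) =====
-- from typing import Dict, Any, List, Optional
--
-- def _find_most_missing_keyword(non_compliant_docs: List[Dict]) -> Optional[str]:
--     """Find the keyword that is missing most often."""
--     missing_counts = {}
--     for doc in non_compliant_docs:
--         for keyword in doc.get('missing_keywords', []):
--             missing_counts[keyword] = missing_counts.get(keyword, 0) + 1
--
--     if missing_counts:
--         return max(missing_counts, key=missing_counts.get)
--     return None
-- ===== SOURCE B (Python) =====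
-- from typing import Dict, List, Optional
--
--
-- def _pick(best, run):
--     """Keep the run with the larger count; on a count tie, the smaller first-occurrence index."""
--     if best is None or run[1] > best[1] or (run[1] == best[1] and run[2] < best[2]):
--         return run
--     return best
--
--
-- def _find_most_missing_keyword(non_compliant_docs: List[Dict]) -> Optional[str]:
--     """Find the keyword that is missing most often (sort-and-scan, no counting dict)."""
--     pairs = []
--     for doc in non_compliant_docs:
--         for kw in doc.get('missing_keywords', []):
--             pairs.append((kw, len(pairs)))
--     pairs.sort(key=lambda p: p[0])
--     best = None   # (keyword, count, first-occurrence index)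
--     run = None
--     for kw, idx in pairs:
--         if run is not None and run[0] == kw:
--             run = (kw, run[1] + 1, min(run[2], idx))
--         else:
--             if run is not None:
--                 best = _pick(best, run)
--             run = (kw, 1, idx)
--     if run is not None:
--         best = _pick(best, run)
--     return best[0] if best is not None else None
-- ===== Notes on version B (the rewrite author's own statement) =====
-- stated objective: alternative
-- what changed: Replaces the counting dict plus max(dict, key=get) with a sort-and-scan algorithm: enumerate the flattened keywords as (keyword, index) pairs, sort them by keyword, then scan the sorted list once, merging equal-keyword runs (run length = count, min index = first appearance) and keeping the best run by (count desc, first-appearance index asc).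
import Mathlib
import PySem

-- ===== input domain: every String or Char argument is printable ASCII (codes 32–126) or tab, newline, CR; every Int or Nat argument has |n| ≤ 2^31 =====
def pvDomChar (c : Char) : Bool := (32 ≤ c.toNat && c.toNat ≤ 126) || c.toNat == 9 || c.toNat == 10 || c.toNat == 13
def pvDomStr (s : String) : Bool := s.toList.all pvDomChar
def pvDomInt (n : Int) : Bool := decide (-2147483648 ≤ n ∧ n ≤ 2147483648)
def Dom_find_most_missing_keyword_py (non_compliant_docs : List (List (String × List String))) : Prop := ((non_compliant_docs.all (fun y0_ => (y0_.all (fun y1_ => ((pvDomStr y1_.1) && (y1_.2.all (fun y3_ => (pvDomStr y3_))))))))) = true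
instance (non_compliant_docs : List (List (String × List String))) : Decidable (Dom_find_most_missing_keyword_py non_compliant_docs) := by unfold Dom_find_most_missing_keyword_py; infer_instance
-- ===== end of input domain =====

-- B replaces A's counting dict + max(dict, key=get) by a sort-and-scan algorithm:
-- enumerate the flattened keywords as (keyword, index) pairs, sort by keyword, merge
-- equal-keyword runs in one scan (run length = count, min index = first appearance),
-- keeping the best run by (count, then earlier first appearance). (alternative)


-- ===== PORT A =====
def find_most_missing_keyword_py (non_compliant_docs : List (List (String × List String))) : Option String :=
  let missing_counts : PySem.Dict String Int :=
    non_compliant_docs.foldl (fun d doc =>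
      ((PySem.Dict.mk doc).getD "missing_keywords" []).foldl
        (fun d keyword => d.insert keyword (d.getD keyword 0 + 1)) d)
      PySem.Dict.empty
  if missing_counts.items ≠ [] then
    PySem.List.max? missing_counts.keys (fun k => missing_counts.getD k 0)
  else none

-- ===== PORT B =====
-- _pick from Source B: keep the run with the larger count; on a tie, the smaller first index.
def pvPick (best : Option (String × Int × Int)) (run : String × Int × Int) : Option (String × Int × Int) :=
  match best with
  | none => some run
  | some b => if run.2.1 > b.2.1 ∨ (run.2.1 = b.2.1 ∧ run.2.2 < b.2.2) then some run else some b

-- the body of Source B's scan loop (state = (best, run), both optional)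
def pvStep (st : Option (String × Int × Int) × Option (String × Int × Int)) (p : String × Int) :
    Option (String × Int × Int) × Option (String × Int × Int) :=
  match st.2 with
  | some r =>
      if r.1 = p.1 then (st.1, some (r.1, r.2.1 + 1, min r.2.2 p.2))
      else (pvPick st.1 r, some (p.1, 1, p.2))
  | none => (st.1, some (p.1, 1, p.2))

def find_most_missing_keyword_py_alt (non_compliant_docs : List (List (String × List String))) : Option String :=
  let pairs : List (String × Int) :=
    non_compliant_docs.foldl (fun pairs doc =>
      ((PySem.Dict.mk doc).getD "missing_keywords" []).foldl
        (fun pairs kw => pairs ++ [(kw, (pairs.length : Int))]) pairs) []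
  let sp := PySem.List.sorted pairs (fun p => p.1)
  let st := sp.foldl pvStep (none, none)
  let best := match st.2 with
    | some r => pvPick st.1 r
    | none => st.1
  match best with
  | some b => some b.1
  | none => none

-- ===== PRECONDITION & SPEC =====
def Spec_find_most_missing_keyword_py (non_compliant_docs : List (List (String × List String))) (out : Option String) : Prop := out = find_most_missing_keyword_py_alt non_compliant_docs
instance (non_compliant_docs : List (List (String × List String))) (out : Option String) : Decidable (Spec_find_most_missing_keyword_py non_compliant_docs out) := by unfold Spec_find_most_missing_keyword_py; infer_instance

-- ===== CLAIM (what is proved, stated in full; the proofs are below) =====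
def Claim_equal_find_most_missing_keyword_py : Prop := ∀ (non_compliant_docs : List (List (String × List String))), Dom_find_most_missing_keyword_py non_compliant_docs → Spec_find_most_missing_keyword_py non_compliant_docs (find_most_missing_keyword_py non_compliant_docs)

-- ===== LEMMAS AND PROOFS =====

-- proof-side definitions: enumeration, first-occurrence index, minimum, run merging
def pvEnum (n : Int) : List String → List (String × Int)
  | [] => []
  | x :: t => (x, n) :: pvEnum (n + 1) t

def pvFirst (n : Int) (l : List String) (k : String) : Int :=
  match l with
  | [] => 0
  | x :: t => if x = k then n else pvFirst (n + 1) t k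

def pvMin0 : List Int → Int
  | [] => 0
  | x :: t => t.foldl min x

def pvRunsAux : Option (String × Int × Int) → List (String × Int) → List (String × Int × Int)
  | none, [] => []
  | some r, [] => [r]
  | none, p :: t => pvRunsAux (some (p.1, 1, p.2)) t
  | some r, p :: t =>
      if r.1 = p.1 then pvRunsAux (some (r.1, r.2.1 + 1, min r.2.2 p.2)) t
      else r :: pvRunsAux (some (p.1, 1, p.2)) t

def pvRuns2 : List (String × Int) → List (String × Int × Int)
  | [] => []
  | p :: t =>
      match pvRuns2 t with
      | [] => [(p.1, 1, p.2)]
      | r :: rs =>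
          if p.1 = r.1 then (p.1, r.2.1 + 1, min p.2 r.2.2) :: rs
          else (p.1, 1, p.2) :: r :: rs

def pvMerge (r : String × Int × Int) : List (String × Int × Int) → List (String × Int × Int)
  | [] => [r]
  | q :: qs => if r.1 = q.1 then (r.1, r.2.1 + q.2.1, min r.2.2 q.2.2) :: qs else r :: q :: qs

-- strict "better run" order: more occurrences, or as many with an earlier first index
def pvLt (a b : String × Int × Int) : Prop := a.2.1 < b.2.1 ∨ (a.2.1 = b.2.1 ∧ b.2.2 < a.2.2)

-- A's nested loop over docs is the same fold over the flattened keyword list.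
theorem pv_foldl_flatMap {α β σ : Type} (g : α → List β) (step : σ → β → σ) :
    ∀ (l : List α) (init : σ),
      l.foldl (fun s a => (g a).foldl step s) init = (l.flatMap g).foldl step init := by
  intro l
  induction l with
  | nil => intro init; simp
  | cons x t ih => intro init; simp [List.foldl_append, ih]

theorem pv_enum_build : ∀ (l : List String) (acc : List (String × Int)),
    l.foldl (fun ps kw => ps ++ [(kw, (ps.length : Int))]) acc = acc ++ pvEnum (acc.length : Int) l := by
  intro l
  induction l with
  | nil => intro acc; simp [pvEnum]
  | cons x t ih =>
    intro acc
    simp only [List.foldl_cons, ih, pvEnum]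
    simp [List.append_assoc]

theorem pv_enum_map_fst : ∀ (n : Int) (l : List String), (pvEnum n l).map Prod.fst = l := by
  intro n l
  induction l generalizing n with
  | nil => simp [pvEnum]
  | cons x t ih => simp [pvEnum, ih]

theorem pv_enum_snd_ge : ∀ (l : List String) (n : Int) (q : String × Int), q ∈ pvEnum n l → n ≤ q.2 := by
  intro l
  induction l with
  | nil => intro n q h; simp [pvEnum] at h
  | cons x t ih =>
    intro n q h
    simp only [pvEnum, List.mem_cons] at h
    rcases h with h | h
    · subst h; simp
    · have := ih (n + 1) q h; omega

theorem pv_enum_countP : ∀ (l : List String) (n : Int) (k : String),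
    (pvEnum n l).countP (fun p => p.1 == k) = l.count k := by
  intro l
  induction l with
  | nil => intro n k; simp [pvEnum]
  | cons x t ih =>
    intro n k
    simp only [pvEnum, List.countP_cons, List.count_cons, ih]

theorem pv_first_shift : ∀ (l : List String) (n : Int) (k : String), k ∈ l →
    pvFirst n l k = n + pvFirst 0 l k := by
  intro l
  induction l with
  | nil => intro n k h; simp at h
  | cons x t ih =>
    intro n k h
    by_cases hx : x = k
    · simp [pvFirst, hx]
    · have hk : k ∈ t := by
        cases List.mem_cons.mp h with
        | inl h' => exact absurd h'.symm hx
        | inr h' => exact h'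
      simp only [pvFirst, if_neg hx]
      rw [ih (n + 1) k hk, ih (0 + 1) k hk]
      omega

theorem pv_foldl_min_assoc : ∀ (u : List Int) (a x : Int), u.foldl min (min x a) = min x (u.foldl min a) := by
  intro u
  induction u with
  | nil => intro a x; rfl
  | cons b t ih =>
    intro a x
    simp only [List.foldl_cons]
    rw [min_assoc, ih]

theorem pv_min0_cons (x : Int) (l : List Int) (h : l ≠ []) : pvMin0 (x :: l) = min x (pvMin0 l) := by
  cases l with
  | nil => exact absurd rfl h
  | cons y t =>
    simp only [pvMin0, List.foldl_cons]
    exact pv_foldl_min_assoc t y x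

theorem pv_min0_mem : ∀ (l : List Int), l ≠ [] → pvMin0 l ∈ l := by
  intro l h
  cases l with
  | nil => exact absurd rfl h
  | cons x t =>
    rcases PySem.List.foldl_min_mem t x with h' | h'
    · simp [pvMin0, h']
    · simp only [pvMin0]; exact List.mem_cons_of_mem _ h'

theorem pv_min0_le : ∀ (l : List Int), ∀ z ∈ l, pvMin0 l ≤ z := by
  intro l z hz
  cases l with
  | nil => simp at hz
  | cons x t =>
    rcases List.mem_cons.mp hz with h' | h'
    · subst h'; simpa [pvMin0] using (PySem.List.foldl_min_le t z).1
    · simpa [pvMin0] using (PySem.List.foldl_min_le t x).2 z h'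

theorem pv_min0_perm : ∀ (l1 l2 : List Int), l1.Perm l2 → pvMin0 l1 = pvMin0 l2 := by
  intro l1 l2 h
  cases l1 with
  | nil =>
    have : l2 = [] := h.symm.eq_nil
    simp [this]
  | cons x t =>
    have hne1 : (x :: t) ≠ [] := by simp
    have hne2 : l2 ≠ [] := by
      intro hc; subst hc; exact absurd h.eq_nil (by simp)
    have h12 : pvMin0 (x :: t) ≤ pvMin0 l2 :=
      pv_min0_le _ _ (h.symm.mem_iff.mp (pv_min0_mem l2 hne2))
    have h21 : pvMin0 l2 ≤ pvMin0 (x :: t) :=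
      pv_min0_le _ _ (h.mem_iff.mp (pv_min0_mem _ hne1))
    omega

theorem pv_enum_min_first : ∀ (l : List String) (n : Int) (k : String), k ∈ l →
    pvMin0 (((pvEnum n l).filter (fun p => p.1 == k)).map Prod.snd) = pvFirst n l k := by
  intro l
  induction l with
  | nil => intro n k h; simp at h
  | cons x t ih =>
    intro n k h
    by_cases hx : x = k
    · have hfil : List.filter (fun p => p.1 == k) ((x, n) :: pvEnum (n + 1) t)
          = (x, n) :: List.filter (fun p => p.1 == k) (pvEnum (n + 1) t) := by
        simp [hx]
      simp only [pvEnum, pvFirst, if_pos hx]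
      rw [hfil, List.map_cons]
      cases hfe : ((pvEnum (n + 1) t).filter (fun p => p.1 == k)).map Prod.snd with
      | nil => simp [pvMin0]
      | cons z zs =>
        rw [pv_min0_cons _ _ (by simp)]
        have hge : n + 1 ≤ pvMin0 (z :: zs) := by
          have hmem := pv_min0_mem (z :: zs) (by simp)
          rw [← hfe] at hmem
          obtain ⟨q, hq, hqy⟩ := List.mem_map.mp hmem
          have := pv_enum_snd_ge t (n + 1) q (List.mem_of_mem_filter hq)
          have heq := congrArg pvMin0 hfe
          omega
        simp only []
        omega
    · have hk : k ∈ t := by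
        cases List.mem_cons.mp h with
        | inl h' => exact absurd h'.symm hx
        | inr h' => exact h'
      have hfil : List.filter (fun p => p.1 == k) ((x, n) :: pvEnum (n + 1) t)
          = List.filter (fun p => p.1 == k) (pvEnum (n + 1) t) := by
        simp [hx]
      simp only [pvEnum, pvFirst, if_neg hx]
      rw [hfil]
      exact ih (n + 1) k hk

theorem pv_scan_eq_runs : ∀ (t : List (String × Int)) (b orun : Option (String × Int × Int)),
    (match (t.foldl pvStep (b, orun)).2 with
     | some r => pvPick (t.foldl pvStep (b, orun)).1 r
     | none => (t.foldl pvStep (b, orun)).1)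
    = (pvRunsAux orun t).foldl pvPick b := by
  intro t
  induction t with
  | nil =>
    intro b orun
    cases orun with
    | none => rfl
    | some r => rfl
  | cons p u ih =>
    intro b orun
    cases orun with
    | none =>
      simp only [List.foldl_cons, pvStep, pvRunsAux]
      exact ih b (some (p.1, 1, p.2))
    | some r =>
      by_cases h : r.1 = p.1
      · simp only [List.foldl_cons, pvStep, if_pos h, pvRunsAux]
        exact ih b (some (r.1, r.2.1 + 1, min r.2.2 p.2))
      · simp only [List.foldl_cons, pvStep, if_neg h, pvRunsAux, List.foldl_cons]
        exact ih (pvPick b r) (some (p.1, 1, p.2))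

theorem pv_runsAux_merge : ∀ (t : List (String × Int)) (r : String × Int × Int),
    pvRunsAux (some r) t = pvMerge r (pvRuns2 t) := by
  intro t
  induction t with
  | nil => intro r; rfl
  | cons p u ih =>
    intro r
    by_cases h : r.1 = p.1
    · have hL : pvRunsAux (some r) (p :: u) = pvMerge (r.1, r.2.1 + 1, min r.2.2 p.2) (pvRuns2 u) := by
        simp only [pvRunsAux, if_pos h]
        exact ih _
      rw [hL]
      cases h2 : pvRuns2 u with
      | nil =>
        have hR : pvRuns2 (p :: u) = [(p.1, 1, p.2)] := by simp only [pvRuns2, h2]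
        rw [hR]
        simp only [pvMerge, if_pos h]
      | cons q qs =>
        by_cases h3 : p.1 = q.1
        · have hR : pvRuns2 (p :: u) = (p.1, q.2.1 + 1, min p.2 q.2.2) :: qs := by
            simp only [pvRuns2, h2, if_pos h3]
          rw [hR]
          have hq : r.1 = q.1 := h.trans h3
          simp only [pvMerge, if_pos hq, if_pos h]
          have e1 : r.2.1 + 1 + q.2.1 = r.2.1 + (q.2.1 + 1) := by omega
          have e2 : min (min r.2.2 p.2) q.2.2 = min r.2.2 (min p.2 q.2.2) := min_assoc _ _ _
          rw [e1, e2]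
        · have hR : pvRuns2 (p :: u) = (p.1, 1, p.2) :: q :: qs := by
            simp only [pvRuns2, h2, if_neg h3]
          rw [hR]
          have hq : ¬ r.1 = q.1 := by rw [h]; exact h3
          simp only [pvMerge, if_neg hq, if_pos h]
    · have hL : pvRunsAux (some r) (p :: u) = r :: pvMerge (p.1, 1, p.2) (pvRuns2 u) := by
        simp only [pvRunsAux, if_neg h]
        rw [ih]
      rw [hL]
      cases h2 : pvRuns2 u with
      | nil =>
        have hR : pvRuns2 (p :: u) = [(p.1, 1, p.2)] := by simp only [pvRuns2, h2]
        rw [hR]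
        simp only [pvMerge, if_neg h]
      | cons q qs =>
        by_cases h3 : p.1 = q.1
        · have hR : pvRuns2 (p :: u) = (p.1, q.2.1 + 1, min p.2 q.2.2) :: qs := by
            simp only [pvRuns2, h2, if_pos h3]
          rw [hR]
          simp only [pvMerge, if_pos h3, if_neg h]
          have e1 : (1 : Int) + q.2.1 = q.2.1 + 1 := by omega
          rw [e1]
        · have hR : pvRuns2 (p :: u) = (p.1, 1, p.2) :: q :: qs := by
            simp only [pvRuns2, h2, if_neg h3]
          rw [hR]
          simp only [pvMerge, if_neg h, if_neg h3]

theorem pv_runsAux_eq_runs2 : ∀ (t : List (String × Int)), pvRunsAux none t = pvRuns2 t := by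
  intro t
  cases t with
  | nil => rfl
  | cons p u =>
    show pvRunsAux (some (p.1, 1, p.2)) u = _
    rw [pv_runsAux_merge]
    cases h2 : pvRuns2 u with
    | nil => simp only [pvRuns2, h2, pvMerge]
    | cons q qs =>
      by_cases h3 : p.1 = q.1
      · have hR : pvRuns2 (p :: u) = (p.1, q.2.1 + 1, min p.2 q.2.2) :: qs := by
          simp only [pvRuns2, h2, if_pos h3]
        rw [hR]
        simp only [pvMerge, if_pos h3]
        have e1 : (1 : Int) + q.2.1 = q.2.1 + 1 := by omega
        rw [e1]
      · have hR : pvRuns2 (p :: u) = (p.1, 1, p.2) :: q :: qs := by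
          simp only [pvRuns2, h2, if_neg h3]
        rw [hR]
        simp only [pvMerge, if_neg h3]

theorem pv_runs_char : ∀ (sp : List (String × Int)), sp.Pairwise (fun a b => a.1 ≤ b.1) →
    ((pvRuns2 sp).map Prod.fst).Pairwise (fun a b => a < b) ∧
    (∀ k : String, k ∈ (pvRuns2 sp).map Prod.fst ↔ k ∈ sp.map Prod.fst) ∧
    (∀ r ∈ pvRuns2 sp, r.2.1 = ((sp.countP (fun p => p.1 == r.1) : Nat) : Int) ∧
        r.2.2 = pvMin0 ((sp.filter (fun p => p.1 == r.1)).map Prod.snd)) := by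
  intro sp
  induction sp with
  | nil => intro _; exact ⟨by simp [pvRuns2], by simp [pvRuns2], by simp [pvRuns2]⟩
  | cons p t ih =>
    intro hpw
    have hall : ∀ q ∈ t, p.1 ≤ q.1 := (List.pairwise_cons.mp hpw).1
    have ht : t.Pairwise (fun a b => a.1 ≤ b.1) := (List.pairwise_cons.mp hpw).2
    obtain ⟨ih1, ih2, ih3⟩ := ih ht
    cases hE : pvRuns2 t with
    | nil =>
      have htnil : t = [] := by
        cases t with
        | nil => rfl
        | cons a u =>
          exfalso
          have hm : a.1 ∈ (pvRuns2 (a :: u)).map Prod.fst := (ih2 a.1).mpr (by simp)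
          rw [hE] at hm; simp at hm
      subst htnil
      refine ⟨by simp [pvRuns2], by simp [pvRuns2], ?_⟩
      intro r hr
      have : r = (p.1, 1, p.2) := by simpa [pvRuns2] using hr
      subst this
      constructor
      · simp
      · simp [pvMin0]
    | cons r rs =>
      have hrmem : r ∈ pvRuns2 t := by rw [hE]; exact List.mem_cons_self
      have hr1t : r.1 ∈ t.map Prod.fst := (ih2 r.1).mp (by rw [hE]; simp)
      have hih1' : ((r :: rs).map Prod.fst).Pairwise (fun a b => a < b) := by rw [← hE]; exact ih1
      have hih1'' : (r.1 :: rs.map Prod.fst).Pairwise (fun a b => a < b) := by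
        rw [List.map_cons] at hih1'; exact hih1'
      have hrsUB : ∀ k ∈ rs.map Prod.fst, r.1 < k := (List.pairwise_cons.mp hih1'').1
      have hrs_pw : (rs.map Prod.fst).Pairwise (fun a b => a < b) := (List.pairwise_cons.mp hih1'').2
      have hpler : p.1 ≤ r.1 := by
        obtain ⟨q, hq, hq1⟩ := List.mem_map.mp hr1t
        exact hq1 ▸ hall q hq
      by_cases hk : p.1 = r.1
      · have hRe : pvRuns2 (p :: t) = (p.1, r.2.1 + 1, min p.2 r.2.2) :: rs := by
          simp only [pvRuns2, hE, if_pos hk]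
        obtain ⟨hc_r, hm_r⟩ := ih3 r hrmem
        refine ⟨?_, ?_, ?_⟩
        · rw [hRe, List.map_cons]
          dsimp only
          refine List.Pairwise.cons ?_ hrs_pw
          intro k hk'
          exact lt_of_le_of_lt (le_of_eq hk) (hrsUB k hk')
        · intro k
          rw [hRe, List.map_cons, List.mem_cons, List.map_cons, List.mem_cons]
          dsimp only
          have h2 := ih2 k
          rw [hE, List.map_cons, List.mem_cons] at h2
          constructor
          · rintro (h' | h')
            · exact Or.inl h'
            · exact Or.inr (h2.mp (Or.inr h'))
          · rintro (h' | h')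
            · exact Or.inl h'
            · rcases h2.mpr h' with h'' | h''
              · exact Or.inl (h''.trans hk.symm)
              · exact Or.inr h''
        · intro x hx
          rw [hRe] at hx
          rcases List.mem_cons.mp hx with hx' | hx'
          · subst hx'
            dsimp only
            have hq : ∃ q ∈ t, q.1 = p.1 := by
              obtain ⟨q, hq, hq1⟩ := List.mem_map.mp hr1t
              exact ⟨q, hq, hq1.trans hk.symm⟩
            obtain ⟨q, hqt, hq1⟩ := hq
            have hfne : t.filter (fun p' => p'.1 == p.1) ≠ [] := by
              intro hc
              have : q ∈ t.filter (fun p' => p'.1 == p.1) :=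
                List.mem_filter.mpr ⟨hqt, by simp [hq1]⟩
              rw [hc] at this; simp at this
            constructor
            · show r.2.1 + 1 = _
              rw [List.countP_cons]
              have : ((fun p' : String × Int => p'.1 == p.1) p) = true := by simp
              rw [if_pos this]
              have : r.2.1 = ((t.countP (fun p' => p'.1 == p.1) : Nat) : Int) := by
                rw [hc_r, ← hk]
              omega
            · show min p.2 r.2.2 = _
              have hfc : (p :: t).filter (fun p' => p'.1 == p.1) = p :: t.filter (fun p' => p'.1 == p.1) := by
                rw [List.filter_cons_of_pos (by simp)]
              rw [hfc, List.map_cons]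
              rw [pv_min0_cons _ _ (by simpa using hfne)]
              have : r.2.2 = pvMin0 ((t.filter (fun p' => p'.1 == p.1)).map Prod.snd) := by
                rw [hm_r, ← hk]
              rw [this]
          · have hx1 : x.1 ∈ rs.map Prod.fst := List.mem_map_of_mem hx'
            have hlt : r.1 < x.1 := hrsUB _ hx1
            have hne : ¬ ((fun p' : String × Int => p'.1 == x.1) p) = true := by
              simp only [beq_iff_eq]
              intro h'
              exact absurd (h' ▸ (hpler.trans_lt hlt)) (lt_irrefl p.1)
            have hcount : (p :: t).countP (fun p' => p'.1 == x.1) = t.countP (fun p' => p'.1 == x.1) := by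
              rw [List.countP_cons, if_neg hne, Nat.add_zero]
            have hfil : (p :: t).filter (fun p' => p'.1 == x.1) = t.filter (fun p' => p'.1 == x.1) :=
              List.filter_cons_of_neg (by simpa using hne)
            rw [hcount, hfil]
            exact ih3 x (by rw [hE]; exact List.mem_cons_of_mem _ hx')
      · have hplr : p.1 < r.1 := lt_of_le_of_ne hpler hk
        have hnot : p.1 ∉ t.map Prod.fst := by
          intro hmem
          have hm : p.1 ∈ (pvRuns2 t).map Prod.fst := (ih2 p.1).mpr hmem
          rw [hE, List.map_cons, List.mem_cons] at hm
          rcases hm with h' | h'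
          · exact hk h'
          · exact absurd (hrsUB _ h') (not_lt.mpr (le_of_lt hplr))
        have hRe : pvRuns2 (p :: t) = (p.1, 1, p.2) :: r :: rs := by
          simp only [pvRuns2, hE, if_neg hk]
        refine ⟨?_, ?_, ?_⟩
        · rw [hRe, List.map_cons, List.map_cons]
          dsimp only
          refine List.Pairwise.cons ?_ hih1''
          intro k hk'
          rcases List.mem_cons.mp hk' with h' | h'
          · exact h' ▸ hplr
          · exact hplr.trans (hrsUB _ h')
        · intro k
          rw [hRe, List.map_cons, List.map_cons, List.mem_cons, List.mem_cons, List.map_cons, List.mem_cons]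
          dsimp only
          have h2 := ih2 k
          rw [hE, List.map_cons, List.mem_cons] at h2
          constructor
          · rintro (h' | h' | h')
            · exact Or.inl h'
            · exact Or.inr (h2.mp (Or.inl h'))
            · exact Or.inr (h2.mp (Or.inr h'))
          · rintro (h' | h')
            · exact Or.inl h'
            · rcases h2.mpr h' with h'' | h''
              · exact Or.inr (Or.inl h'')
              · exact Or.inr (Or.inr h'')
        · intro x hx
          rw [hRe] at hx
          rcases List.mem_cons.mp hx with hx' | hx'
          · subst hx'
            dsimp only
            have hzero : t.countP (fun p' => p'.1 == p.1) = 0 := by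
              rw [List.countP_eq_zero]
              intro q hq
              simp only [beq_iff_eq]
              intro h'
              exact hnot (h' ▸ List.mem_map_of_mem hq)
            have hfnil : t.filter (fun p' => p'.1 == p.1) = [] := by
              rw [List.filter_eq_nil_iff]
              intro q hq
              simp only [beq_iff_eq]
              intro h'
              exact hnot (h' ▸ List.mem_map_of_mem hq)
            constructor
            · show (1 : Int) = _
              rw [List.countP_cons, if_pos (by simp), hzero]
              rfl
            · show p.2 = _
              rw [List.filter_cons_of_pos (by simp), hfnil]
              rfl
          · have hx1 : x.1 ∈ t.map Prod.fst := by
              have : x.1 ∈ (pvRuns2 t).map Prod.fst := by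
                rw [hE]; exact List.mem_map_of_mem hx'
              exact (ih2 x.1).mp this
            have hne : ¬ ((fun p' : String × Int => p'.1 == x.1) p) = true := by
              simp only [beq_iff_eq]
              intro h'
              exact hnot (h' ▸ hx1)
            have hcount : (p :: t).countP (fun p' => p'.1 == x.1) = t.countP (fun p' => p'.1 == x.1) := by
              rw [List.countP_cons, if_neg hne, Nat.add_zero]
            have hfil : (p :: t).filter (fun p' => p'.1 == x.1) = t.filter (fun p' => p'.1 == x.1) :=
              List.filter_cons_of_neg (by simpa using hne)
            rw [hcount, hfil]
            exact ih3 x (by rw [hE]; exact hx')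

theorem pv_first_ge : ∀ (l : List String) (n : Int) (k : String), k ∈ l → n ≤ pvFirst n l k := by
  intro l
  induction l with
  | nil => intro n k h; simp at h
  | cons x t ih =>
    intro n k h
    by_cases hx : x = k
    · simp [pvFirst, hx]
    · have hk : k ∈ t := by
        cases List.mem_cons.mp h with
        | inl h' => exact absurd h'.symm hx
        | inr h' => exact h'
      simp only [pvFirst, if_neg hx]
      have := ih (n + 1) k hk
      omega

theorem pv_set_first_pairwise : ∀ (l : List String),
    (PySem.Set.ofList l).Pairwise (fun a b => pvFirst 0 l a < pvFirst 0 l b) := by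
  intro l
  induction l with
  | nil => simp [PySem.Set.ofList_nil]
  | cons x t ih =>
    rw [PySem.Set.ofList_cons]
    refine List.Pairwise.cons ?_ ?_
    · intro y hy
      have hmem := (PySem.Set.mem_discard _ _ _).mp hy
      have hyt : y ∈ t := (PySem.Set.mem_ofList _ _).mp hmem.1
      have hyx : ¬ x = y := fun h => hmem.2 (h ▸ rfl)
      show (if x = x then (0:Int) else pvFirst (0+1) t x) < (if x = y then (0:Int) else pvFirst (0+1) t y)
      rw [if_pos rfl, if_neg hyx, pv_first_shift t (0+1) y hyt]
      have h2 := pv_first_ge t 0 y hyt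
      omega
    · have hsub : ((PySem.Set.ofList t).discard x).Sublist (PySem.Set.ofList t) :=
        List.filter_sublist
      refine ((ih.sublist hsub).imp_of_mem ?_)
      intro a b ha hb hab
      have hat : a ∈ t := (PySem.Set.mem_ofList _ _).mp ((PySem.Set.mem_discard _ _ _).mp ha).1
      have hbt : b ∈ t := (PySem.Set.mem_ofList _ _).mp ((PySem.Set.mem_discard _ _ _).mp hb).1
      have hax : ¬ x = a := fun h => ((PySem.Set.mem_discard _ _ _).mp ha).2 (h ▸ rfl)
      have hbx : ¬ x = b := fun h => ((PySem.Set.mem_discard _ _ _).mp hb).2 (h ▸ rfl)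
      show (if x = a then (0:Int) else pvFirst (0+1) t a) < (if x = b then (0:Int) else pvFirst (0+1) t b)
      rw [if_neg hax, if_neg hbx, pv_first_shift t (0+1) a hat, pv_first_shift t (0+1) b hbt]
      omega

theorem pv_pick_fold_some : ∀ (l : List (String × Int × Int)) (b : String × Int × Int),
    ((b :: l).map (fun r => r.2.2)).Nodup →
    ∃ m, l.foldl pvPick (some b) = some m ∧ (m = b ∨ m ∈ l) ∧ (b = m ∨ pvLt b m) ∧
      (∀ y ∈ l, y = m ∨ pvLt y m) := by
  intro l
  induction l with
  | nil =>
    intro b _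
    exact ⟨b, rfl, Or.inl rfl, Or.inl rfl, by simp⟩
  | cons x t ih =>
    intro b hnd
    have hnd' := hnd
    rw [List.map_cons, List.map_cons, List.nodup_cons] at hnd'
    have hbx22 : b.2.2 ≠ x.2.2 := fun h => hnd'.1 (by rw [h]; exact List.mem_cons_self)
    by_cases hc : x.2.1 > b.2.1 ∨ (x.2.1 = b.2.1 ∧ x.2.2 < b.2.2)
    · -- x replaces b
      have hfold : (x :: t).foldl pvPick (some b) = t.foldl pvPick (some x) := by
        simp only [List.foldl_cons, pvPick, if_pos hc]
      have hndx : ((x :: t).map (fun r => r.2.2)).Nodup := by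
        rw [List.map_cons]; exact hnd'.2
      obtain ⟨m, hm, hmem, hbm, hall⟩ := ih x hndx
      refine ⟨m, hfold ▸ hm, ?_, ?_, ?_⟩
      · rcases hmem with h | h
        · exact Or.inr (h ▸ List.mem_cons_self)
        · exact Or.inr (List.mem_cons_of_mem _ h)
      · have hbltx : pvLt b x := by unfold pvLt; omega
        rcases hbm with h | h
        · exact Or.inr (h ▸ hbltx)
        · exact Or.inr (by unfold pvLt at hbltx h ⊢; omega)
      · intro y hy
        rcases List.mem_cons.mp hy with h | h
        · subst h; exact hbm
        · exact hall y h
    · -- b survives x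
      have hfold : (x :: t).foldl pvPick (some b) = t.foldl pvPick (some b) := by
        simp only [List.foldl_cons, pvPick, if_neg hc]
      have hxltb : pvLt x b := by unfold pvLt; omega
      have hndb : ((b :: t).map (fun r => r.2.2)).Nodup := by
        rw [List.map_cons, List.nodup_cons]
        exact ⟨fun h => hnd'.1 (List.mem_cons_of_mem _ h), (List.nodup_cons.mp hnd'.2).2⟩
      obtain ⟨m, hm, hmem, hbm, hall⟩ := ih b hndb
      refine ⟨m, hfold ▸ hm, ?_, hbm, ?_⟩
      · rcases hmem with h | h
        · exact Or.inl h
        · exact Or.inr (List.mem_cons_of_mem _ h)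
      · intro y hy
        rcases List.mem_cons.mp hy with h | h
        · subst h
          rcases hbm with h' | h'
          · exact Or.inr (h' ▸ hxltb)
          · exact Or.inr (by unfold pvLt at hxltb h' ⊢; omega)
        · exact hall y h

theorem pv_lt_asymm {a b : String × Int × Int} (h1 : pvLt a b) (h2 : pvLt b a) : False := by
  unfold pvLt at h1 h2; omega

theorem pv_pick_fold_perm : ∀ (l1 l2 : List (String × Int × Int)),
    l1.Perm l2 → (l1.map (fun r => r.2.2)).Nodup →
    l1.foldl pvPick none = l2.foldl pvPick none := by
  intro l1 l2 hp hnd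
  cases l1 with
  | nil => rw [hp.symm.eq_nil]
  | cons x t =>
    cases l2 with
    | nil => exact absurd hp.eq_nil (by simp)
    | cons y u =>
      have hnd2 : ((y :: u).map (fun r => r.2.2)).Nodup := ((hp.map _).nodup_iff).mp hnd
      have e1 : (x :: t).foldl pvPick none = t.foldl pvPick (some x) := by
        simp only [List.foldl_cons, pvPick]
      have e2 : (y :: u).foldl pvPick none = u.foldl pvPick (some y) := by
        simp only [List.foldl_cons, pvPick]
      obtain ⟨m1, hm1, hmem1, hb1, hall1⟩ := pv_pick_fold_some t x hnd
      obtain ⟨m2, hm2, hmem2, hb2, hall2⟩ := pv_pick_fold_some u y hnd2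
      have hm1mem : m1 ∈ x :: t := by
        rcases hmem1 with h | h
        · exact h ▸ List.mem_cons_self
        · exact List.mem_cons_of_mem _ h
      have hm2mem : m2 ∈ y :: u := by
        rcases hmem2 with h | h
        · exact h ▸ List.mem_cons_self
        · exact List.mem_cons_of_mem _ h
      have hall1' : ∀ z ∈ x :: t, z = m1 ∨ pvLt z m1 := by
        intro z hz
        rcases List.mem_cons.mp hz with h | h
        · subst h
          rcases hb1 with h' | h'
          · exact Or.inl h'
          · exact Or.inr h'
        · exact hall1 z h
      have hall2' : ∀ z ∈ y :: u, z = m2 ∨ pvLt z m2 := by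
        intro z hz
        rcases List.mem_cons.mp hz with h | h
        · subst h
          rcases hb2 with h' | h'
          · exact Or.inl h'
          · exact Or.inr h'
        · exact hall2 z h
      have heqm : m1 = m2 := by
        have h12 := hall2' m1 (hp.mem_iff.mp hm1mem)
        have h21 := hall1' m2 (hp.symm.mem_iff.mp hm2mem)
        rcases h12 with h | h
        · exact h
        · rcases h21 with h' | h'
          · exact h'.symm
          · exact absurd h (fun hh => pv_lt_asymm hh h')
      rw [e1, e2, hm1, hm2, heqm]

-- the step of Python's max(..., key=...) fold
def pvMaxStep (cnt : String → Int) (acc : Option String) (x : String) : Option String :=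
  match acc with
  | none => some x
  | some m => if cnt m < cnt x then some x else some m

theorem pv_max?_eq_foldl (cnt : String → Int) (ks : List String) :
    PySem.List.max? ks cnt = ks.foldl (pvMaxStep cnt) none := by
  unfold PySem.List.max?
  exact PySem.List.foldl_congr_mem ks _ (pvMaxStep cnt) none
    (fun acc x _ => by cases acc <;> rfl)

theorem pv_pick_eq_max_aux (cnt fst : String → Int) :
    ∀ (ks : List String) (m : String), (∀ y ∈ ks, fst m < fst y) →
      ks.Pairwise (fun a b => fst a < fst b) →
    ((ks.map (fun k => (k, cnt k, fst k))).foldl pvPick (some (m, cnt m, fst m)))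
      = (ks.foldl (pvMaxStep cnt) (some m)).map (fun k => (k, cnt k, fst k)) := by
  intro ks
  induction ks with
  | nil => intro m _ _; rfl
  | cons x kt ih =>
    intro m hlt hpw
    have hmx : fst m < fst x := hlt x List.mem_cons_self
    have hx : ∀ y ∈ kt, fst x < fst y := (List.pairwise_cons.mp hpw).1
    have hpw' : kt.Pairwise (fun a b => fst a < fst b) := (List.pairwise_cons.mp hpw).2
    simp only [List.map_cons, List.foldl_cons]
    by_cases hcm : cnt m < cnt x
    · have hstep : pvPick (some (m, cnt m, fst m)) (x, cnt x, fst x) = some (x, cnt x, fst x) := by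
        simp only [pvPick]
        rw [if_pos (Or.inl hcm)]
      have hstep2 : pvMaxStep cnt (some m) x = some x := by
        simp only [pvMaxStep]
        rw [if_pos hcm]
      rw [hstep, hstep2]
      exact ih x hx hpw'
    · have hcond : ¬ (((x, cnt x, fst x) : String × Int × Int).2.1 > ((m, cnt m, fst m) : String × Int × Int).2.1
          ∨ (((x, cnt x, fst x) : String × Int × Int).2.1 = ((m, cnt m, fst m) : String × Int × Int).2.1
             ∧ ((x, cnt x, fst x) : String × Int × Int).2.2 < ((m, cnt m, fst m) : String × Int × Int).2.2)) := by
        dsimp only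
        intro hcon
        rcases hcon with h | ⟨h1, h2⟩
        · omega
        · omega
      have hstep : pvPick (some (m, cnt m, fst m)) (x, cnt x, fst x) = some (m, cnt m, fst m) := by
        simp only [pvPick]
        rw [if_neg hcond]
      have hstep2 : pvMaxStep cnt (some m) x = some m := by
        simp only [pvMaxStep]
        rw [if_neg hcm]
      rw [hstep, hstep2]
      refine ih m ?_ hpw'
      intro y hy
      exact hmx.trans (hx y hy)

theorem pv_pick_eq_max (cnt fst : String → Int) :
    ∀ (ks : List String), ks.Pairwise (fun a b => fst a < fst b) →
    ((ks.map (fun k => (k, cnt k, fst k))).foldl pvPick none)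
      = (PySem.List.max? ks cnt).map (fun k => (k, cnt k, fst k)) := by
  intro ks hpw
  rw [pv_max?_eq_foldl]
  cases ks with
  | nil => rfl
  | cons k0 kt =>
    have h0 : ∀ y ∈ kt, fst k0 < fst y := (List.pairwise_cons.mp hpw).1
    have hpw' : kt.Pairwise (fun a b => fst a < fst b) := (List.pairwise_cons.mp hpw).2
    simp only [List.map_cons, List.foldl_cons]
    have h1 : pvPick none (k0, cnt k0, fst k0) = some (k0, cnt k0, fst k0) := rfl
    have h2 : pvMaxStep cnt none k0 = some k0 := rfl
    rw [h1, h2]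
    exact pv_pick_eq_max_aux cnt fst kt k0 h0 hpw'

-- ===== assembly =====
theorem pv_A_eq (docs : List (List (String × List String))) :
    find_most_missing_keyword_py docs
      = PySem.List.max?
          (PySem.Set.ofList (docs.flatMap (fun doc => (PySem.Dict.mk doc).getD "missing_keywords" [])))
          (fun k => ((List.count k (docs.flatMap (fun doc => (PySem.Dict.mk doc).getD "missing_keywords" [])) : Nat) : Int)) := by
  unfold find_most_missing_keyword_py
  simp only []
  rw [pv_foldl_flatMap (fun doc => (PySem.Dict.mk doc).getD "missing_keywords" [])
    (fun (d : PySem.Dict String Int) keyword => d.insert keyword (d.getD keyword 0 + 1)) docs PySem.Dict.empty]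
  set flat := docs.flatMap (fun doc => (PySem.Dict.mk doc).getD "missing_keywords" []) with hflat
  rw [PySem.Dict.foldl_insert_getD_add_one_eq_counter flat]
  cases hf : flat with
  | nil =>
    simp [PySem.Dict.items_counter, PySem.Set.ofList_nil, PySem.List.max?]
  | cons y ys =>
    have hne : (PySem.Dict.counter (y :: ys)).items ≠ [] := by
      rw [PySem.Dict.items_counter]
      intro hcontr
      have : y ∈ PySem.Set.ofList (y :: ys) := by
        rw [PySem.Set.mem_ofList]; simp
      simp_all
    rw [if_pos hne]
    have hkey : (fun k => (PySem.Dict.counter (y :: ys)).getD k 0)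
        = (fun k => ((List.count k (y :: ys) : Nat) : Int)) := by
      funext k; rw [PySem.Dict.getD_counter]
    rw [PySem.Dict.keys_counter, hkey]

theorem pv_match_map (X : Option (String × Int × Int)) :
    (match X with | some b => some b.1 | none => (none : Option String)) = X.map Prod.fst := by
  cases X <;> rfl

theorem pv_B_eq (docs : List (List (String × List String))) :
    find_most_missing_keyword_py_alt docs
      = PySem.List.max?
          (PySem.Set.ofList (docs.flatMap (fun doc => (PySem.Dict.mk doc).getD "missing_keywords" [])))
          (fun k => ((List.count k (docs.flatMap (fun doc => (PySem.Dict.mk doc).getD "missing_keywords" [])) : Nat) : Int)) := by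
  unfold find_most_missing_keyword_py_alt
  simp only []
  rw [pv_foldl_flatMap (fun doc => (PySem.Dict.mk doc).getD "missing_keywords" [])
    (fun (ps : List (String × Int)) kw => ps ++ [(kw, (ps.length : Int))]) docs []]
  set FL := docs.flatMap (fun doc => (PySem.Dict.mk doc).getD "missing_keywords" []) with hFL
  rw [pv_enum_build FL []]
  simp only [List.nil_append, List.length_nil, Nat.cast_zero]
  set sp := PySem.List.sorted (pvEnum 0 FL) (fun p => p.1) with hsp
  rw [pv_match_map, pv_scan_eq_runs sp none none, pv_runsAux_eq_runs2]
  have hperm : sp.Perm (pvEnum 0 FL) := PySem.List.sorted_perm _ _ _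
  have hpw : sp.Pairwise (fun a b => a.1 ≤ b.1) := PySem.List.sorted_pairwise _ _
  obtain ⟨h1, h2, h3⟩ := pv_runs_char sp hpw
  have hmapfst : (sp.map Prod.fst).Perm FL := by
    have := hperm.map Prod.fst
    rwa [pv_enum_map_fst] at this
  have hcomp : ∀ r ∈ pvRuns2 sp,
      r = (r.1, ((List.count r.1 FL : Nat) : Int), pvFirst 0 FL r.1) := by
    intro r hr
    obtain ⟨hc, hm⟩ := h3 r hr
    have hk1 : r.1 ∈ FL := by
      have h' := (h2 r.1).mp (List.mem_map_of_mem hr)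
      exact hmapfst.mem_iff.mp h'
    have hcount : sp.countP (fun p => p.1 == r.1) = List.count r.1 FL := by
      rw [hperm.countP_eq]
      exact pv_enum_countP FL 0 r.1
    have hmin : pvMin0 ((sp.filter (fun p => p.1 == r.1)).map Prod.snd) = pvFirst 0 FL r.1 := by
      rw [pv_min0_perm _ _ ((hperm.filter _).map _)]
      exact pv_enum_min_first FL 0 r.1 hk1
    calc r = (r.1, r.2.1, r.2.2) := rfl
      _ = (r.1, ((List.count r.1 FL : Nat) : Int), pvFirst 0 FL r.1) := by
          rw [hc, hm, hcount, hmin]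
  have hmem_iff : ∀ x, x ∈ pvRuns2 sp ↔
      x ∈ (PySem.Set.ofList FL).map (fun k => (k, ((List.count k FL : Nat) : Int), pvFirst 0 FL k)) := by
    intro x
    constructor
    · intro hx
      have hx1 : x.1 ∈ FL := by
        have h' := (h2 x.1).mp (List.mem_map_of_mem hx)
        exact hmapfst.mem_iff.mp h'
      rw [hcomp x hx]
      exact List.mem_map_of_mem ((PySem.Set.mem_ofList _ _).mpr hx1)
    · intro hx
      obtain ⟨k, hk, hkx⟩ := List.mem_map.mp hx
      have hkFL : k ∈ FL := (PySem.Set.mem_ofList _ _).mp hk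
      have hkin : k ∈ (pvRuns2 sp).map Prod.fst :=
        (h2 k).mpr (hmapfst.mem_iff.mpr hkFL)
      obtain ⟨r, hr, hr1⟩ := List.mem_map.mp hkin
      have hrc := hcomp r hr
      rw [← hkx, ← hr1, ← hrc]
      exact hr
  have hEnodup : ((PySem.Set.ofList FL).map
      (fun k => (k, ((List.count k FL : Nat) : Int), pvFirst 0 FL k))).Nodup := by
    refine List.Nodup.map ?_ (PySem.Set.nodup_ofList FL)
    intro a b hab
    exact congrArg Prod.fst hab
  have hRnodup : (pvRuns2 sp).Nodup := by
    have hmn : ((pvRuns2 sp).map Prod.fst).Pairwise (fun a b => a ≠ b) :=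
      h1.imp (fun h => ne_of_lt h)
    exact (List.Nodup.of_map _ hmn)
  have hRE : (pvRuns2 sp).Perm ((PySem.Set.ofList FL).map
      (fun k => (k, ((List.count k FL : Nat) : Int), pvFirst 0 FL k))) :=
    (List.perm_ext_iff_of_nodup hRnodup hEnodup).mpr hmem_iff
  have hE22 : (((PySem.Set.ofList FL).map
      (fun k => (k, ((List.count k FL : Nat) : Int), pvFirst 0 FL k))).map (fun r => r.2.2)).Nodup := by
    rw [List.map_map]
    have hp := pv_set_first_pairwise FL
    have hmapped : ((PySem.Set.ofList FL).map (fun k => pvFirst 0 FL k)).Pairwise (fun a b => a < b) :=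
      List.pairwise_map.mpr hp
    have : ((PySem.Set.ofList FL).map (fun k => pvFirst 0 FL k)).Pairwise (fun a b => a ≠ b) :=
      hmapped.imp (fun h => ne_of_lt h)
    exact this
  have hR22 : ((pvRuns2 sp).map (fun r => r.2.2)).Nodup :=
    ((hRE.map _).nodup_iff).mpr hE22
  rw [pv_pick_fold_perm _ _ hRE hR22]
  rw [pv_pick_eq_max (fun k => ((List.count k FL : Nat) : Int)) (fun k => pvFirst 0 FL k)
      (PySem.Set.ofList FL) (pv_set_first_pairwise FL)]
  rw [Option.map_map]
  cases PySem.List.max? (PySem.Set.ofList FL) (fun k => ((List.count k FL : Nat) : Int)) <;> rfl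

-- ===== VERDICT (by name: the statement is the Claim_ definition above) =====
theorem find_most_missing_keyword_py_spec : Claim_equal_find_most_missing_keyword_py := by
  intro docs _
  unfold Spec_find_most_missing_keyword_py
  rw [pv_A_eq, pv_B_eq]
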